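-- pv_equiv track=rewrite | github.com/Malfindor/Red-Team | chimera/client.py | resolveFileName
-- ===== SOURCE A (Python) =====
-- def resolveFileName(ips):
--     characters = []
--     fileName = ""
--     for ip in ips:
--         ipSplit = ip.split('.')
--         for entry in ipSplit:
--             characters.append(entry)
--     for character in characters:
--         if character == "3":
--             break
--         fileName = fileName + chr(int(character))
--
--     return fileName
-- ===== SOURCE B (Python) =====
-- def resolveFileName(ips):
--     fileName = ""
--     for ip in ips:
--         for entry in ip.split('.'):
--             if entry == "3":
--                 return fileName
--             fileName += chr(int(entry))
--     return fileName
-- ===== Notes on version B (the rewrite author's own statement) =====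
-- stated objective: simpler
-- what changed: B fuses A's two passes into one early-exit traversal: it never builds the intermediate characters list, splitting each ip and returning as soon as an entry equals "3".
import Mathlib
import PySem

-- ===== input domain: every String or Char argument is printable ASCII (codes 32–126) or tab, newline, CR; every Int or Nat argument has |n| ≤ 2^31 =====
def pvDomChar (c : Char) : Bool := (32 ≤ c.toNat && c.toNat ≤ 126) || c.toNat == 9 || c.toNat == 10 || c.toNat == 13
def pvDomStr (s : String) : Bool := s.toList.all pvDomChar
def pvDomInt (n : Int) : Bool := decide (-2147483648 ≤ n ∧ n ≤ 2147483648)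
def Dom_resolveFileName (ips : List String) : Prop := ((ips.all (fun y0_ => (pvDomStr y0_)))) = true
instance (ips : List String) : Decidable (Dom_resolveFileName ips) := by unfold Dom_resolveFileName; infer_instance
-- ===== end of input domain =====

-- B fuses A's two passes into one early-exit traversal (no intermediate list); same return value on Pre_.

-- ip.split(".") (sep nonempty, so split? is always some)
def pySplitDot (ip : String) : List String := (PySem.Str.split? ip ".").getD []

-- chr(int(s)) as an Option: none = ValueError from int() or chr(), or a lone-surrogate
-- code point (Python returns it, but it is not a Lean Char/String value); exact elsewhere.
def pyChrInt? (s : String) : Option Char :=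
  (PySem.Int.ofStr? s).bind (fun n =>
    if 0 ≤ n ∧ n < 1114112 ∧ (n < 55296 ∨ 57344 ≤ n) then some (Char.ofNat n.toNat) else none)

-- ===== PORT A =====
-- second loop of A: break on "3"; on a ValueError/unportable chr (outside Pre_) stop with fn
def loopA : List String → String → String
  | [], fn => fn
  | c :: rest, fn =>
    if c = "3" then fn
    else
      match pyChrInt? c with
      | some ch => loopA rest (fn.push ch)
      | none => fn

def resolveFileName (ips : List String) : String :=
  loopA (ips.foldl (fun acc ip => acc ++ pySplitDot ip) []) ""

-- ===== PORT B =====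
-- inner loop over one ip's entries: .inl r = early `return r` (or, outside Pre_, the raise point), .inr fn = keep going
def altInner : List String → String → String ⊕ String
  | [], fn => .inr fn
  | e :: rest, fn =>
    if e = "3" then .inl fn
    else
      match pyChrInt? e with
      | some ch => altInner rest (fn.push ch)
      | none => .inl fn

def altOuter : List String → String → String
  | [], fn => fn
  | ip :: rest, fn =>
    match altInner (pySplitDot ip) fn with
    | .inl r => r
    | .inr fn' => altOuter rest fn'

def resolveFileName_alt (ips : List String) : String := altOuter ips ""

-- ===== PRECONDITION & SPEC =====
-- Pre_ excludes inputs where A raises ValueError (an entry before the first "3" that int() or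
-- chr() rejects) and entries naming lone-surrogate code points 0xD800–0xDFFF, where A returns a
-- Python str that is not a representable Lean String value.
def Pre_resolveFileName (ips : List String) : Prop :=
  ∀ e ∈ (ips.flatMap (fun ip => pySplitDot ip)).takeWhile (fun e => e ≠ "3"),
    (pyChrInt? e).isSome = true

instance (ips : List String) : Decidable (Pre_resolveFileName ips) := by
  unfold Pre_resolveFileName; infer_instance

def pvWitness_resolveFileName : List String := ["104.105", "3.120"]

def Spec_resolveFileName (ips : List String) (out : String) : Prop := out = resolveFileName_alt ips
instance (ips : List String) (out : String) : Decidable (Spec_resolveFileName ips out) := by unfold Spec_resolveFileName; infer_instance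

-- ===== CLAIM (what is proved, stated in full; the proofs are below) =====
def Claim_equal_resolveFileName : Prop := ∀ (ips : List String), Dom_resolveFileName ips → Pre_resolveFileName ips → Spec_resolveFileName ips (resolveFileName ips)

-- ===== LEMMAS AND PROOFS =====

-- A's concatenated second loop, cut at one ip's worth of entries, agrees with B's inner loop.
theorem loopA_append (xs : List String) (fn : String) :
    (∀ r, altInner xs fn = .inl r → ∀ ys, loopA (xs ++ ys) fn = r) ∧
    (∀ fn', altInner xs fn = .inr fn' → ∀ ys, loopA (xs ++ ys) fn = loopA ys fn') := by
  induction xs generalizing fn with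
  | nil =>
    constructor
    · intro r h; simp [altInner] at h
    · intro fn' h ys; simp [altInner] at h; simp [h]
  | cons e rest ih =>
    constructor
    · intro r h ys
      simp only [altInner] at h
      simp only [List.cons_append, loopA]
      split_ifs with he
      · simp [he] at h; simp [h]
      · simp [he] at h
        cases hc : pyChrInt? e with
        | none => simp [hc] at h; simp [h]
        | some ch => simp [hc] at h; exact (ih (fn.push ch)).1 r h ys
    · intro fn' h ys
      simp only [altInner] at h
      simp only [List.cons_append, loopA]
      split_ifs with he
      · simp [he] at h
      · simp [he] at h
        cases hc : pyChrInt? e with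
        | none => simp [hc] at h
        | some ch => simp [hc] at h; exact (ih (fn.push ch)).2 fn' h ys

theorem loopA_flatMap (ips : List String) (fn : String) :
    loopA (ips.flatMap (fun ip => pySplitDot ip)) fn = altOuter ips fn := by
  induction ips generalizing fn with
  | nil => simp [loopA, altOuter]
  | cons ip rest ih =>
    simp only [List.flatMap_cons, altOuter]
    cases h : altInner (pySplitDot ip) fn with
    | inl r => exact (loopA_append _ fn).1 r h _
    | inr fn' => rw [(loopA_append _ fn).2 fn' h _]; exact ih fn'

theorem foldl_app (ips : List String) (acc : List String) :
    ips.foldl (fun acc ip => acc ++ pySplitDot ip) acc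
      = acc ++ ips.flatMap (fun ip => pySplitDot ip) := by
  induction ips generalizing acc with
  | nil => simp
  | cons ip rest ih => simp [List.foldl_cons, ih]

-- ===== VERDICT (by name: the statement is the Claim_ definition above) =====
theorem resolveFileName_spec : Claim_equal_resolveFileName := by
  intro ips _ _
  unfold Spec_resolveFileName resolveFileName resolveFileName_alt
  rw [foldl_app]
  simpa using loopA_flatMap ips ""
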